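-- pv_equiv track=rewrite | github.com/onys-programmer/daily-coding | 2021/202108/20210819/max_income.py | solution
-- ===== SOURCE A (Python) =====
-- def solution(N, duration, cost):
--     dp = [0]*(N+1)
--
--     def dynamic_programming():
--         max_val = 0
--         for i in range(N-1, -1, -1):
--             # 날짜 안 지날 경우
--             if i + duration[i] <= N:
--                 cur_income_may = cost[i] + dp[i + duration[i]]
--
--                 if cur_income_may > max_val:
--                     max_val = cur_income_may
--
--                 dp[i] = max_val
--
--             # 날짜 지날 경우
--             else:
--                 dp[i] = dp[i + 1]
--
--         return max_val
--
--     result = dynamic_programming()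
--     return result
-- ===== SOURCE B (Python) =====
-- def solution(N, duration, cost):
--     # Forward day-sweep DP: bucket each job by its end day, then sweep days
--     # 1..N carrying the best income so far and folding in jobs ending that day.
--     if N <= 0:
--         return 0
--     by_end = {}
--     for i in range(N):
--         t = i + duration[i]
--         if t <= N:
--             by_end.setdefault(t, []).append(i)
--     dp = [0] * (N + 1)
--     for t in range(1, N + 1):
--         best = dp[t - 1]
--         for i in by_end.get(t, ()):
--             v = cost[i] + dp[i]
--             if v > best:
--                 best = v
--         dp[t] = best
--     return dp[N]
-- ===== Notes on version B (the rewrite author's own statement) =====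
-- stated objective: alternative
-- what changed: Replaces A's backward per-job gather DP (nested helper threading a running max, dp[i] from dp[i+1] and dp[i+duration[i]]) by a forward per-day sweep: jobs are first bucketed by end day into a dict built once, then days 1..N are swept carrying the best income so far and folding in cost[i]+dp[i] for the jobs ending that day.
-- outside the precondition, e.g. on solution(2, [0, 1], [5, 1]): A returns 5, B returns 1; on solution(1, [-1], [7]): A returns 7, B returns 0
import Mathlib
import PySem

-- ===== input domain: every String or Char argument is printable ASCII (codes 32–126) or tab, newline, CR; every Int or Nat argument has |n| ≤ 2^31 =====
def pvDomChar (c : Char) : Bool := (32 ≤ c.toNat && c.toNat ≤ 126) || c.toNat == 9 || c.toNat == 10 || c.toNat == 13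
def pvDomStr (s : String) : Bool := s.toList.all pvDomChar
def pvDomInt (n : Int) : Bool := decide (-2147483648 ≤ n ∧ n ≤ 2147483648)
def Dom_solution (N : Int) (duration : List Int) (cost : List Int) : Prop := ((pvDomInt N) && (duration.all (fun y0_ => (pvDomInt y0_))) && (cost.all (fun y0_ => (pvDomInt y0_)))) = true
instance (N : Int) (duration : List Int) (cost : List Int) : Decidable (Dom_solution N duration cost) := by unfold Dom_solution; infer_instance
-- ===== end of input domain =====

-- B replaces A's backward per-job gather DP (nested helper threading a running max) by a
-- forward per-day sweep: jobs are bucketed by end day into a dict built once, then days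
-- 1..N are swept carrying the best income so far, folding in the jobs ending each day.

-- ===== PORT A =====
-- One loop iteration of A's 'dynamic_programming': state (dp, max_val).
def stepA (N : Int) (duration : List Int) (cost : List Int)
    (st : List Int × Int) (i : Int) : List Int × Int :=
  if i + PySem.List.pyGetD duration i 0 ≤ N then
    -- cur_income_may = cost[i] + dp[i + duration[i]]; if cur > max_val: max_val = cur; dp[i] = max_val
    (st.1.set i.toNat
      (if PySem.List.pyGetD cost i 0 +
          PySem.List.pyGetD st.1 (i + PySem.List.pyGetD duration i 0) 0 > st.2 then
        PySem.List.pyGetD cost i 0 +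
          PySem.List.pyGetD st.1 (i + PySem.List.pyGetD duration i 0) 0
       else st.2),
     if PySem.List.pyGetD cost i 0 +
         PySem.List.pyGetD st.1 (i + PySem.List.pyGetD duration i 0) 0 > st.2 then
       PySem.List.pyGetD cost i 0 +
         PySem.List.pyGetD st.1 (i + PySem.List.pyGetD duration i 0) 0
     else st.2)
  else
    -- dp[i] = dp[i + 1]
    (st.1.set i.toNat (PySem.List.pyGetD st.1 (i + 1) 0), st.2)

def solution (N : Int) (duration : List Int) (cost : List Int) : Int :=
  -- dp = [0]*(N+1); result = dynamic_programming() — the fold over range(N-1, -1, -1) returns max_val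
  ((PySem.List.pyRange (N - 1) (-1) (-1)).foldl (stepA N duration cost)
    (List.replicate (N + 1).toNat (0 : Int), 0)).2

-- ===== PORT B =====
-- by_end: for i in range(N): t = i + duration[i]; if t <= N: by_end.setdefault(t, []).append(i)
def bucketsB (N : Int) (duration : List Int) : PySem.Dict Int (List Int) :=
  (PySem.List.pyRange 0 N).foldl
    (fun d i =>
      if i + PySem.List.pyGetD duration i 0 ≤ N then
        d.modify (i + PySem.List.pyGetD duration i 0) [] (· ++ [i])
      else d)
    PySem.Dict.empty

-- the inner for-loop over one day's bucket: best = max of cost[i] + dp[i] over it, from b0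
def innerB (cost : List Int) (dp : List Int) (bucket : List Int) (b0 : Int) : Int :=
  bucket.foldl (fun b i =>
    if PySem.List.pyGetD cost i 0 + PySem.List.pyGetD dp i 0 > b then
      PySem.List.pyGetD cost i 0 + PySem.List.pyGetD dp i 0
    else b) b0

def solution_alt (N : Int) (duration : List Int) (cost : List Int) : Int :=
  if N ≤ 0 then 0
  else
    PySem.List.pyGetD
      ((PySem.List.pyRange 1 (N + 1)).foldl
        (fun dp t =>
          dp.set t.toNat
            (innerB cost dp ((bucketsB N duration).getD t [])
              (PySem.List.pyGetD dp (t - 1) 0)))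
        (List.replicate (N + 1).toNat (0 : Int)))
      N 0

-- ===== PRECONDITION & SPEC =====
-- Pre_ excludes (a) inputs on which A raises an IndexError (N beyond a list's length, or a
-- dp read reaching past the front of the list), and (b) inputs with a zero or negative
-- duration before day N: durations are day counts, the task is unspecified there, and A's
-- value (obtained through Python's end-relative indexing or from dp slots not yet filled)
-- and B's forward-sweep value are two defensible readings of such an input.
def Pre_solution (N : Int) (duration : List Int) (cost : List Int) : Prop :=
  N ≤ (duration.length : Int) ∧ N ≤ (cost.length : Int) ∧
  ∀ i ∈ List.range N.toNat, 1 ≤ duration.getD i 0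
instance (N : Int) (duration : List Int) (cost : List Int) : Decidable (Pre_solution N duration cost) := by
  unfold Pre_solution; infer_instance

def pvWitness_solution : Int × List Int × List Int := (2, [1, 1], [3, 2])

def Spec_solution (N : Int) (duration : List Int) (cost : List Int) (out : Int) : Prop := out = solution_alt N duration cost
instance (N : Int) (duration : List Int) (cost : List Int) (out : Int) : Decidable (Spec_solution N duration cost out) := by unfold Spec_solution; infer_instance

-- ===== CLAIM (what is proved, stated in full; the proofs are below) =====
def Claim_equal_solution : Prop := ∀ (N : Int) (duration : List Int) (cost : List Int), Dom_solution N duration cost → Pre_solution N duration cost → Spec_solution N duration cost (solution N duration cost)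

-- ===== LEMMAS AND PROOFS =====

-- The suffix optimum opt i = best income obtainable from day i on (jobs k ≥ i).
def pvOpt (duration cost : List Int) (n : Nat) (i : Nat) : Int :=
  if _h : i < n then
    if h2 : 1 ≤ duration.getD i 0 ∧ (i : Int) + duration.getD i 0 ≤ (n : Int) then
      max (pvOpt duration cost n (i + 1))
        (cost.getD i 0 + pvOpt duration cost n (i + (duration.getD i 0).toNat))
    else pvOpt duration cost n (i + 1)
  else 0
termination_by n - i
decreasing_by all_goals omega

-- jobs ending exactly on day t (with positive duration)
def pvBucket (duration : List Int) (n : Nat) (t : Nat) : List Nat :=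
  (List.range n).filter
    (fun k => decide (1 ≤ duration.getD k 0) && decide ((k : Int) + duration.getD k 0 = (t : Int)))

theorem pvBucket_lt (duration : List Int) (n t : Nat) (k : Nat) (hk : k ∈ pvBucket duration n (t + 1)) :
    k < t + 1 ∧ k < n ∧ 1 ≤ duration.getD k 0 ∧ (k : Int) + duration.getD k 0 = ((t + 1 : Nat) : Int) := by
  have := List.mem_filter.mp hk
  simp only [List.mem_range, Bool.and_eq_true, decide_eq_true_eq] at this
  refine ⟨?_, this.1, this.2.1, this.2.2⟩
  omega

-- The prefix optimum G t = best income from jobs finishing by day t (forward sweep value).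
def pvG (duration cost : List Int) (n : Nat) (t : Nat) : Int :=
  match t with
  | 0 => 0
  | t' + 1 =>
    (pvBucket duration n (t' + 1)).attach.foldl
      (fun b x => max b (cost.getD x.1 0 + pvG duration cost n x.1))
      (pvG duration cost n t')
termination_by t
decreasing_by
  · exact (pvBucket_lt duration n t' x.1 x.2).1
  · omega

-- feasible schedules: strictly ordered chains of jobs, each fitting before day hi
def pvFeas (duration : List Int) (n hi : Nat) : Nat → List Nat → Prop
  | _, [] => True
  | lo, i :: rest =>
    lo ≤ i ∧ i < n ∧ 1 ≤ duration.getD i 0 ∧ (i : Int) + duration.getD i 0 ≤ (hi : Int) ∧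
      pvFeas duration n hi (i + (duration.getD i 0).toNat) rest

def pvVal (cost : List Int) (s : List Nat) : Int := (s.map (fun i => cost.getD i 0)).sum

-- generic fold-max helpers (for the inner sweep loop)
theorem foldlMax_ge_init {α : Type} (f : α → Int) :
    ∀ (l : List α) (a : Int), a ≤ l.foldl (fun b x => max b (f x)) a := by
  intro l
  induction l with
  | nil => intro a; simp
  | cons h t ih => intro a; exact le_trans (le_max_left a (f h)) (ih _)

theorem foldlMax_ge_mem {α : Type} (f : α → Int) :
    ∀ (l : List α) (a : Int) (x : α), x ∈ l → f x ≤ l.foldl (fun b x => max b (f x)) a := by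
  intro l
  induction l with
  | nil => intro a x hx; simp at hx
  | cons h t ih =>
    intro a x hx
    rcases List.mem_cons.mp hx with rfl | hx
    · exact le_trans (le_max_right a (f x)) (foldlMax_ge_init f t _)
    · exact ih _ x hx

theorem foldlMax_cases {α : Type} (f : α → Int) :
    ∀ (l : List α) (a : Int),
      l.foldl (fun b x => max b (f x)) a = a ∨ ∃ x ∈ l, l.foldl (fun b x => max b (f x)) a = f x := by
  intro l
  induction l with
  | nil => intro a; left; rfl
  | cons h t ih =>
    intro a
    rcases ih (max a (f h)) with h1 | ⟨x, hx, hfx⟩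
    · rcases le_total (f h) a with hle | hle
      · left; simpa [max_eq_left hle] using h1
      · right; exact ⟨h, List.mem_cons_self .., by simpa [max_eq_right hle] using h1⟩
    · right; exact ⟨x, List.mem_cons_of_mem _ hx, hfx⟩

theorem pvOpt_stop (duration cost : List Int) (n i : Nat) (h : n ≤ i) :
    pvOpt duration cost n i = 0 := by
  unfold pvOpt
  simp [Nat.not_lt.mpr h]

theorem pvOpt_feas (duration cost : List Int) (n i : Nat) (h : i < n)
    (h1 : 1 ≤ duration.getD i 0) (h2 : (i : Int) + duration.getD i 0 ≤ (n : Int)) :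
    pvOpt duration cost n i
      = max (pvOpt duration cost n (i + 1))
          (cost.getD i 0 + pvOpt duration cost n (i + (duration.getD i 0).toNat)) := by
  rw [pvOpt]
  rw [dif_pos h, dif_pos ⟨h1, h2⟩]

theorem pvOpt_infeas (duration cost : List Int) (n i : Nat) (h : i < n)
    (h2 : ¬(1 ≤ duration.getD i 0 ∧ (i : Int) + duration.getD i 0 ≤ (n : Int))) :
    pvOpt duration cost n i = pvOpt duration cost n (i + 1) := by
  rw [pvOpt]
  rw [dif_pos h, dif_neg h2]

theorem pvOpt_nonneg (duration cost : List Int) (n i : Nat) :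
    0 ≤ pvOpt duration cost n i := by
  induction i using pvOpt.induct duration n with
  | case1 i h h2 ih1 ih2 =>
    rw [pvOpt_feas duration cost n i h h2.1 h2.2]
    exact le_trans ih1 (le_max_left _ _)
  | case2 i h h2 ih => rw [pvOpt_infeas duration cost n i h h2]; exact ih
  | case3 i h => rw [pvOpt_stop duration cost n i (by omega)]

theorem pvOpt_succ_le (duration cost : List Int) (n i : Nat) :
    pvOpt duration cost n (i + 1) ≤ pvOpt duration cost n i := by
  by_cases h : i < n
  · by_cases h2 : 1 ≤ duration.getD i 0 ∧ (i : Int) + duration.getD i 0 ≤ (n : Int)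
    · rw [pvOpt_feas duration cost n i h h2.1 h2.2]
      exact le_max_left _ _
    · rw [pvOpt_infeas duration cost n i h h2]
  · rw [pvOpt_stop duration cost n i (by omega),
      pvOpt_stop duration cost n (i + 1) (by omega)]

theorem pvOpt_anti (duration cost : List Int) (n : Nat) {i j : Nat} (h : i ≤ j) :
    pvOpt duration cost n j ≤ pvOpt duration cost n i := by
  induction j, h using Nat.le_induction with
  | base => exact le_refl _
  | succ j hij ih => exact le_trans (pvOpt_succ_le duration cost n j) ih

theorem pvFeas_lo_mono (duration : List Int) (n hi : Nat) {lo lo' : Nat} (h : lo' ≤ lo) :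
    ∀ s, pvFeas duration n hi lo s → pvFeas duration n hi lo' s := by
  intro s hs
  cases s with
  | nil => trivial
  | cons a rest =>
    obtain ⟨h1, h2⟩ := hs
    exact ⟨by omega, h2⟩

theorem pvFeas_hi_mono (duration : List Int) (n : Nat) {hi hi' : Nat} (h : hi ≤ hi') :
    ∀ s lo, pvFeas duration n hi lo s → pvFeas duration n hi' lo s := by
  intro s
  induction s with
  | nil => intro lo _; trivial
  | cons a rest ih =>
    intro lo hs
    obtain ⟨h1, h2, h3, h4, h5⟩ := hs
    exact ⟨h1, h2, h3, by omega, ih _ h5⟩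

-- opt is an upper bound on every feasible schedule starting at or after i
theorem pvOpt_ub (duration cost : List Int) (n : Nat) :
    ∀ s i, pvFeas duration n n i s → pvVal cost s ≤ pvOpt duration cost n i := by
  intro s
  induction s with
  | nil => intro i _; simpa [pvVal] using pvOpt_nonneg duration cost n i
  | cons a rest ih =>
    intro i hs
    obtain ⟨hia, han, hd, hend, hrest⟩ := hs
    have h1 : pvVal cost rest ≤ pvOpt duration cost n (a + (duration.getD a 0).toNat) := ih _ hrest
    have h2 : pvVal cost (a :: rest) = cost.getD a 0 + pvVal cost rest := by
      simp [pvVal]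
    have h3 : cost.getD a 0 + pvOpt duration cost n (a + (duration.getD a 0).toNat)
        ≤ pvOpt duration cost n a := by
      rw [pvOpt_feas duration cost n a han hd hend]
      exact le_max_right _ _
    calc pvVal cost (a :: rest) = cost.getD a 0 + pvVal cost rest := h2
      _ ≤ cost.getD a 0 + pvOpt duration cost n (a + (duration.getD a 0).toNat) := by omega
      _ ≤ pvOpt duration cost n a := h3
      _ ≤ pvOpt duration cost n i := pvOpt_anti duration cost n hia

-- opt is achieved by some feasible schedule
theorem pvOpt_achieved (duration cost : List Int) (n : Nat) :
    ∀ i, ∃ s, pvFeas duration n n i s ∧ pvVal cost s = pvOpt duration cost n i := by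
  intro i
  induction i using pvOpt.induct duration n with
  | case1 i h h2 ih1 ih2 =>
    rw [pvOpt_feas duration cost n i h h2.1 h2.2]
    obtain ⟨s1, hs1, hv1⟩ := ih1
    obtain ⟨s2, hs2, hv2⟩ := ih2
    rcases le_total (cost.getD i 0 + pvOpt duration cost n (i + (duration.getD i 0).toNat))
        (pvOpt duration cost n (i + 1)) with hle | hle
    · exact ⟨s1, pvFeas_lo_mono duration n n (by omega) s1 hs1, by rw [hv1, max_eq_left hle]⟩
    · refine ⟨i :: s2, ⟨le_refl i, h, h2.1, h2.2, hs2⟩, ?_⟩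
      simp only [pvVal, List.map_cons, List.sum_cons]
      rw [show ((s2.map fun k => cost.getD k 0).sum) = pvVal cost s2 from rfl, hv2,
        max_eq_right hle]
  | case2 i h h2 ih =>
    rw [pvOpt_infeas duration cost n i h h2]
    obtain ⟨s1, hs1, hv1⟩ := ih
    exact ⟨s1, pvFeas_lo_mono duration n n (by omega) s1 hs1, hv1⟩
  | case3 i h =>
    rw [pvOpt_stop duration cost n i (by omega)]
    exact ⟨[], trivial, by simp [pvVal]⟩

-- unfold pvG at a successor, with the attach removed
theorem pvG_succ (duration cost : List Int) (n t : Nat) :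
    pvG duration cost n (t + 1)
      = (pvBucket duration n (t + 1)).foldl
          (fun b k => max b (cost.getD k 0 + pvG duration cost n k))
          (pvG duration cost n t) := by
  rw [pvG]
  exact List.foldl_attach (l := pvBucket duration n (t + 1))
    (f := fun b k => max b (cost.getD k 0 + pvG duration cost n k)) (b := pvG duration cost n t)

theorem pvG_mono (duration cost : List Int) (n : Nat) {t t' : Nat} (h : t ≤ t') :
    pvG duration cost n t ≤ pvG duration cost n t' := by
  induction t', h using Nat.le_induction with
  | base => exact le_refl _
  | succ t' htt ih =>
    refine le_trans ih ?_
    rw [pvG_succ]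
    exact foldlMax_ge_init _ _ _

theorem pvG_nonneg (duration cost : List Int) (n t : Nat) :
    0 ≤ pvG duration cost n t := by
  have : pvG duration cost n 0 = 0 := by rw [pvG]
  have h := pvG_mono duration cost n (Nat.zero_le t)
  omega

-- decomposing a feasible schedule at its last job
theorem pvFeas_snoc (duration : List Int) (n hi j : Nat) :
    ∀ s lo, pvFeas duration n hi lo (s ++ [j]) →
      pvFeas duration n j lo s ∧ lo ≤ j ∧ j < n ∧ 1 ≤ duration.getD j 0 ∧
        (j : Int) + duration.getD j 0 ≤ (hi : Int) := by
  intro s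
  induction s with
  | nil =>
    intro lo hs
    obtain ⟨h1, h2, h3, h4, _⟩ := hs
    exact ⟨trivial, h1, h2, h3, h4⟩
  | cons a s' ih =>
    intro lo hs
    obtain ⟨h1, h2, h3, h4, h5⟩ := hs
    obtain ⟨hf, hlo, hjn, hjd, hjend⟩ := ih _ h5
    have haj : (a : Int) + duration.getD a 0 ≤ (j : Int) := by
      cases s' with
      | nil =>
        obtain ⟨hlo', _⟩ := h5
        omega
      | cons b s'' =>
        obtain ⟨hab, _, hbd, hbend, _⟩ := hf
        obtain ⟨hab', _⟩ := h5
        omega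
    exact ⟨⟨h1, h2, h3, haj, hf⟩, by omega, hjn, hjd, hjend⟩
  -- (the last component of hf is the tail's feasibility with hi := j)

theorem pvFeas_snoc_intro (duration : List Int) (n hi j : Nat)
    (hjn : j < n) (hjd : 1 ≤ duration.getD j 0) (hjend : (j : Int) + duration.getD j 0 ≤ (hi : Int)) :
    ∀ s lo, pvFeas duration n j lo s → lo ≤ j → pvFeas duration n hi lo (s ++ [j]) := by
  intro s
  induction s with
  | nil =>
    intro lo _ hloj
    exact ⟨hloj, hjn, hjd, hjend, trivial⟩
  | cons a s' ih =>
    intro lo hs hloj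
    obtain ⟨h1, h2, h3, h4, h5⟩ := hs
    refine ⟨h1, h2, h3, by omega, ih _ h5 (by omega)⟩

-- G is an upper bound on every schedule finishing by day t
theorem pvG_ub (duration cost : List Int) (n : Nat) :
    ∀ s t, t ≤ n → pvFeas duration n t 0 s → pvVal cost s ≤ pvG duration cost n t := by
  intro s
  induction s using List.reverseRecOn with
  | nil => intro t _ _; simpa [pvVal] using pvG_nonneg duration cost n t
  | append_singleton init j ih =>
    intro t htn hs
    obtain ⟨hf, _, hjn, hjd, hjend⟩ := pvFeas_snoc duration n t j init 0 hs
    have hinit : pvVal cost init ≤ pvG duration cost n j := ih j (by omega) hf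
    have hjt : j + (duration.getD j 0).toNat ≤ t := by omega
    have hjmem : j ∈ pvBucket duration n (j + (duration.getD j 0).toNat) := by
      have h1 : 1 ≤ j + (duration.getD j 0).toNat := by omega
      apply List.mem_filter.mpr
      refine ⟨List.mem_range.mpr hjn, ?_⟩
      simp only [Bool.and_eq_true, decide_eq_true_eq]
      constructor
      · exact hjd
      · push_cast; omega
    have hstep : cost.getD j 0 + pvG duration cost n j
        ≤ pvG duration cost n (j + (duration.getD j 0).toNat) := by
      obtain ⟨t', ht'⟩ : ∃ t', j + (duration.getD j 0).toNat = t' + 1 :=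
        ⟨j + (duration.getD j 0).toNat - 1, by omega⟩
      rw [ht']
      rw [pvG_succ]
      exact foldlMax_ge_mem _ _ _ j (ht' ▸ hjmem)
    have hmono := pvG_mono duration cost n hjt
    have hval : pvVal cost (init ++ [j]) = pvVal cost init + cost.getD j 0 := by
      simp [pvVal]
    omega

-- G is achieved by some schedule finishing by day t
theorem pvG_achieved (duration cost : List Int) (n : Nat) :
    ∀ t, t ≤ n → ∃ s, pvFeas duration n t 0 s ∧ pvVal cost s = pvG duration cost n t := by
  intro t
  induction t using Nat.strong_induction_on with
  | _ t ih =>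
    intro htn
    match t with
    | 0 => exact ⟨[], trivial, by simp [pvVal, pvG]⟩
    | t' + 1 =>
      rw [pvG_succ]
      rcases foldlMax_cases (fun k => cost.getD k 0 + pvG duration cost n k)
          (pvBucket duration n (t' + 1)) (pvG duration cost n t') with hcase | ⟨k, hk, hcase⟩
      · obtain ⟨s, hs, hv⟩ := ih t' (by omega) (by omega)
        exact ⟨s, pvFeas_hi_mono duration n (by omega) s 0 hs, by rw [hv, hcase]⟩
      · obtain ⟨hkt, hkn, hkd, hke⟩ := pvBucket_lt duration n t' k hk
        obtain ⟨s, hs, hv⟩ := ih k (by omega) (by omega)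
        refine ⟨s ++ [k], ?_, ?_⟩
        · exact pvFeas_snoc_intro duration n (t' + 1) k hkn hkd (by rw [hke]) s 0 hs (by omega)
        · rw [show pvVal cost (s ++ [k]) = pvVal cost s + cost.getD k 0 by simp [pvVal],
            hv, hcase]
          omega

-- THE CENTRAL EQUALITY: backward suffix optimum = forward prefix optimum
theorem pvOpt_eq_pvG (duration cost : List Int) (n : Nat) :
    pvOpt duration cost n 0 = pvG duration cost n n := by
  apply le_antisymm
  · obtain ⟨s, hs, hv⟩ := pvOpt_achieved duration cost n 0
    rw [← hv]
    exact pvG_ub duration cost n s n (le_refl n) hs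
  · obtain ⟨s, hs, hv⟩ := pvG_achieved duration cost n n (le_refl n)
    rw [← hv]
    exact pvOpt_ub duration cost n s 0 hs

-- ======== linking port A to pvOpt ========

theorem getD_set_invariant (dp : List Int) (k : Nat) (v : Int) (j : Nat) (hk : k < dp.length) :
    (dp.set k v).getD j 0 = if j = k then v else dp.getD j 0 := by
  split_ifs with h
  · subst h; simp [List.getD, hk]
  · simp [List.getD, List.getElem?_set_ne (by omega : k ≠ j)]

theorem keyA (N : Int) (duration cost : List Int) (n : Nat)
    (hN : N = (n : Int)) (hd : ∀ i, i < n → 1 ≤ duration.getD i 0) :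
    ∀ k, k ≤ n → ∀ (dp : List Int) (mv : Int), dp.length = n + 1 →
      (∀ j, k ≤ j → j ≤ n → dp.getD j 0 = pvOpt duration cost n j) →
      mv = pvOpt duration cost n k →
      ((PySem.List.pyRange ((k : Int) - 1) (-1) (-1)).foldl (stepA N duration cost) (dp, mv)).2
        = pvOpt duration cost n 0 := by
  intro k
  induction k with
  | zero =>
    intro _ dp mv _ _ hmv
    rw [PySem.List.pyRange_neg_one_eq_nil (by norm_num)]
    simpa using hmv
  | succ k ih =>
    intro hkn dp mv hlen hinv hmv
    rw [show ((k + 1 : Nat) : Int) - 1 = (k : Int) by push_cast; ring,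
      PySem.List.pyRange_neg_one_cons (by omega : (-1 : Int) < (k : Int))]
    simp only [List.foldl_cons]
    have hdgd : PySem.List.pyGetD duration (k : Int) 0 = duration.getD k 0 :=
      PySem.List.pyGetD_natCast duration k 0
    have hdk : 1 ≤ duration.getD k 0 := hd k (by omega)
    have hkl : k < dp.length := by omega
    by_cases hfeas : (k : Int) + duration.getD k 0 ≤ N
    · -- feasible branch of A
      have hj : (k : Int) + duration.getD k 0 = ((k + (duration.getD k 0).toNat : Nat) : Int) := by
        push_cast; omega
      have hjle : k + (duration.getD k 0).toNat ≤ n := by omega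
      have hdpj : PySem.List.pyGetD dp ((k : Int) + duration.getD k 0) 0
          = pvOpt duration cost n (k + (duration.getD k 0).toNat) := by
        rw [hj, PySem.List.pyGetD_natCast]
        exact hinv _ (by omega) hjle
      have hcg : PySem.List.pyGetD cost (k : Int) 0 = cost.getD k 0 :=
        PySem.List.pyGetD_natCast cost k 0
      have hoptk : pvOpt duration cost n k
          = max (pvOpt duration cost n (k + 1))
              (cost.getD k 0 + pvOpt duration cost n (k + (duration.getD k 0).toNat)) :=
        pvOpt_feas duration cost n k (by omega) hdk (by omega)
      have hmv' :
          (if PySem.List.pyGetD cost (k : Int) 0 +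
              PySem.List.pyGetD dp ((k : Int) + PySem.List.pyGetD duration (k : Int) 0) 0 > mv then
            PySem.List.pyGetD cost (k : Int) 0 +
              PySem.List.pyGetD dp ((k : Int) + PySem.List.pyGetD duration (k : Int) 0) 0
          else mv) = pvOpt duration cost n k := by
        rw [hdgd, hcg, hdpj, hmv, hoptk]
        split_ifs with hgt
        · rw [max_eq_right (le_of_lt hgt)]
        · rw [max_eq_left (by omega)]
      rw [stepA, if_pos (by rw [hdgd]; exact hfeas)]
      simp only [hmv']
      apply ih (by omega)
      · simpa using hlen
      · intro j hkj hjn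
        rw [Int.toNat_natCast, getD_set_invariant dp k _ j hkl]
        split_ifs with hjk
        · subst hjk; rfl
        · exact hinv j (by omega) hjn
      · rfl
    · -- infeasible branch of A
      have hoptk : pvOpt duration cost n k = pvOpt duration cost n (k + 1) := by
        refine pvOpt_infeas duration cost n k (by omega) ?_
        intro hc
        exact hfeas (by rw [hN]; exact hc.2)
      have hdp1 : PySem.List.pyGetD dp ((k : Int) + 1) 0 = pvOpt duration cost n (k + 1) := by
        rw [show ((k : Int) + 1) = ((k + 1 : Nat) : Int) by push_cast; ring,
          PySem.List.pyGetD_natCast]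
        exact hinv _ (by omega) (by omega)
      rw [stepA, if_neg (by rw [hdgd]; exact hfeas)]
      apply ih (by omega)
      · simpa using hlen
      · intro j hkj hjn
        rw [Int.toNat_natCast, getD_set_invariant dp k _ j hkl]
        split_ifs with hjk
        · subst hjk; rw [hdp1, hoptk]
        · exact hinv j (by omega) hjn
      · rw [hmv, hoptk]

-- ======== linking port B to pvG ========

-- the guarded modify-fold is the unconditional modify-fold over the filtered pair list
theorem guarded_fold_eq (p : Nat → Prop) [DecidablePred p] (key : Nat → Int) (vf : Nat → Int) :
    ∀ (l : List Nat) (d : PySem.Dict Int (List Int)),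
      l.foldl (fun d k => if p k then d.modify (key k) [] (· ++ [vf k]) else d) d
        = ((l.filter (fun k => decide (p k))).map (fun k => (key k, vf k))).foldl
            (fun d q => d.modify q.1 [] (· ++ [q.2])) d := by
  intro l
  induction l with
  | nil => intro d; rfl
  | cons a l' ih =>
    intro d
    by_cases hp : p a
    · rw [List.foldl_cons, if_pos hp, List.filter_cons_of_pos (by simp [hp]), List.map_cons,
        List.foldl_cons]
      exact ih _
    · rw [List.foldl_cons, if_neg hp, List.filter_cons_of_neg (by simp [hp])]
      exact ih _

theorem bucketsB_getD (N : Int) (duration : List Int) (n : Nat)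
    (hN : N = (n : Int)) (hd : ∀ i, i < n → 1 ≤ duration.getD i 0)
    (c : Nat) (hcn : c ≤ n) :
    (bucketsB N duration).getD ((c : Nat) : Int) []
      = (pvBucket duration n c).map (fun (k : Nat) => (k : Int)) := by
  unfold bucketsB
  rw [hN, PySem.List.pyRange_zero_natCast, List.foldl_map]
  have hcong : (List.range n).foldl
      (fun (d : PySem.Dict Int (List Int)) (k : Nat) =>
        if (↑k : Int) + PySem.List.pyGetD duration ↑k 0 ≤ (↑n : Int) then
          d.modify ((↑k : Int) + PySem.List.pyGetD duration ↑k 0) [] (· ++ [(↑k : Int)])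
        else d) PySem.Dict.empty
    = (List.range n).foldl
      (fun (d : PySem.Dict Int (List Int)) (k : Nat) =>
        if (↑k : Int) + duration.getD k 0 ≤ (↑n : Int) then
          d.modify ((↑k : Int) + duration.getD k 0) [] (· ++ [(↑k : Int)])
        else d) PySem.Dict.empty := by
    apply PySem.List.foldl_congr_mem
    intro acc x _
    rw [PySem.List.pyGetD_natCast]
  rw [hcong,
    guarded_fold_eq (fun k => (↑k : Int) + duration.getD k 0 ≤ (↑n : Int))
      (fun k => (↑k : Int) + duration.getD k 0) (fun k => (↑k : Int)) (List.range n)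
      PySem.Dict.empty,
    PySem.Dict.getD_foldl_modify_append]
  simp only [PySem.Dict.getD_empty, List.nil_append, List.filter_map, List.map_map,
    List.filter_filter, Function.comp_def]
  unfold pvBucket
  refine congrArg _ (List.filter_congr ?_)
  intro k hk
  have hkn : k < n := List.mem_range.mp hk
  have h1 := hd k hkn
  rw [Bool.eq_iff_iff]
  simp only [Bool.and_eq_true, decide_eq_true_eq, beq_iff_eq]
  constructor
  · rintro ⟨h2, _⟩; exact ⟨h1, h2⟩
  · rintro ⟨_, h2⟩; exact ⟨h2, by omega⟩

-- inner loop = fold-max over the abstract bucket, when dp already agrees with pvG below t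
theorem innerB_eq (duration cost : List Int) (n : Nat) (dp : List Int) (t : Nat)
    (hdp : ∀ k, k < t + 1 → k ≤ n → dp.getD k 0 = pvG duration cost n k) :
    innerB cost dp ((pvBucket duration n (t + 1)).map (fun (k : Nat) => (k : Int)))
        (pvG duration cost n t)
      = pvG duration cost n (t + 1) := by
  rw [pvG_succ]
  unfold innerB
  rw [List.foldl_map]
  apply PySem.List.foldl_congr_mem
  intro b k hk
  obtain ⟨hkt, hkn, _, _⟩ := pvBucket_lt duration n t k hk
  rw [PySem.List.pyGetD_natCast, PySem.List.pyGetD_natCast,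
    hdp k hkt (by omega)]
  rcases lt_or_ge b (cost.getD k 0 + pvG duration cost n k) with hlt | hge
  · rw [if_pos hlt, max_eq_right (le_of_lt hlt)]
  · rw [if_neg (by omega), max_eq_left hge]

theorem keyB (N : Int) (duration cost : List Int) (n : Nat)
    (hN : N = (n : Int)) (hd : ∀ i, i < n → 1 ≤ duration.getD i 0) :
    ∀ m, m ≤ n →
      ∃ dp, (PySem.List.pyRange 1 ((m : Int) + 1)).foldl
          (fun dp t =>
            dp.set t.toNat
              (innerB cost dp ((bucketsB N duration).getD t [])
                (PySem.List.pyGetD dp (t - 1) 0)))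
          (List.replicate (n + 1) (0 : Int)) = dp ∧
        dp.length = n + 1 ∧
        (∀ j, j ≤ n → dp.getD j 0 = if j ≤ m then pvG duration cost n j else 0) := by
  intro m
  induction m with
  | zero =>
    intro _
    refine ⟨List.replicate (n + 1) (0 : Int), ?_, by simp, ?_⟩
    · rw [show ((0 : Nat) : Int) + 1 = 1 by norm_num,
        show PySem.List.pyRange 1 1 = [] from rfl]
      rfl
    · intro j _
      split_ifs with h
      · rw [show j = 0 by omega, show pvG duration cost n 0 = 0 by rw [pvG]]
        simp [List.getD]
      · simp [List.getD]
  | succ m ih =>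
    intro hmn
    obtain ⟨dp, hfold, hlen, hinv⟩ := ih (by omega)
    rw [show ((m + 1 : Nat) : Int) + 1 = ((m : Int) + 1) + 1 by push_cast; ring,
      PySem.List.pyRange_one_succ_right (by omega : (1 : Int) ≤ (m : Int) + 1),
      List.foldl_append, hfold]
    simp only [List.foldl_cons, List.foldl_nil]
    have hm1 : ((m : Int) + 1) = ((m + 1 : Nat) : Int) := by push_cast; ring
    have hbt : (bucketsB N duration).getD ((m : Int) + 1) []
        = (pvBucket duration n (m + 1)).map (fun (k : Nat) => (k : Int)) := by
      rw [hm1]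
      exact bucketsB_getD N duration n hN hd (m + 1) hmn
    have hdpm : PySem.List.pyGetD dp ((m : Int) + 1 - 1) 0 = pvG duration cost n m := by
      rw [show (m : Int) + 1 - 1 = ((m : Nat) : Int) by ring, PySem.List.pyGetD_natCast]
      rw [hinv m (by omega), if_pos (le_refl m)]
    have hinner : innerB cost dp ((bucketsB N duration).getD ((m : Int) + 1) [])
        (PySem.List.pyGetD dp ((m : Int) + 1 - 1) 0) = pvG duration cost n (m + 1) := by
      rw [hbt, hdpm]
      apply innerB_eq duration cost n dp m
      intro k hk hkn
      rw [hinv k hkn, if_pos (by omega)]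
    refine ⟨_, rfl, by simpa using hlen, ?_⟩
    intro j hjn
    rw [hinner, show ((m : Int) + 1).toNat = m + 1 by omega,
      getD_set_invariant dp (m + 1) _ j (by omega)]
    split_ifs with hjm1 hjle hjle
    · subst hjm1; rfl
    · omega
    · rw [hinv j hjn, if_pos (by omega)]
    · rw [hinv j hjn, if_neg (by omega)]

-- ===== VERDICT (by name: the statement is the Claim_ definition above) =====
theorem solution_spec : Claim_equal_solution := by
  intro N duration cost _ hpre
  obtain ⟨-, -, hdur⟩ := hpre
  unfold Spec_solution
  by_cases hN : N ≤ 0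
  · -- empty loop on both sides
    unfold solution solution_alt
    rw [if_pos hN, PySem.List.pyRange_neg_one_eq_nil (by omega : N - 1 ≤ -1)]
    rfl
  · have hN0 : 0 < N := by omega
    set n := N.toNat with hn
    have hNn : N = (n : Int) := by omega
    have hdn : ∀ i, i < n → 1 ≤ duration.getD i 0 := by
      intro i hi
      exact hdur i (List.mem_range.mpr hi)
    -- A's side
    have hA : solution N duration cost = pvOpt duration cost n 0 := by
      unfold solution
      rw [show N - 1 = (n : Int) - 1 by omega,
        show (N + 1).toNat = n + 1 by omega]
      exact keyA N duration cost n hNn hdn n (le_refl n)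
        (List.replicate (n + 1) (0 : Int)) 0 (by simp)
        (fun j hj hjn => by
          rw [show j = n by omega, pvOpt_stop duration cost n n (le_refl n)]
          simp [List.getD])
        (by rw [pvOpt_stop duration cost n n (le_refl n)])
    -- B's side
    have hB : solution_alt N duration cost = pvG duration cost n n := by
      unfold solution_alt
      rw [if_neg hN]
      obtain ⟨dp, hfold, hlen, hinv⟩ := keyB N duration cost n hNn hdn n (le_refl n)
      rw [show N + 1 = (n : Int) + 1 by omega,
        show (((n : Int)) + 1).toNat = n + 1 by omega] at *
      rw [hfold, hNn, PySem.List.pyGetD_natCast]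
      rw [hinv n (le_refl n), if_pos (le_refl n)]
    rw [hA, hB, pvOpt_eq_pvG]
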